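-- pv_equiv track=rewrite | github.com/EmiliaWilson/pdl_tranforms | Transform.py | __parse
-- ===== SOURCE A (Python) =====
-- def __parse(defaults, uopts=None):
--     return_dict = defaults.copy()
--     if uopts is None:
--         return return_dict
--     for k in defaults.keys():
--         for r in uopts.keys():
--             if k == r and uopts[r] is not None:
--                 return_dict[k] = uopts[r]
--
--     return return_dict
-- ===== SOURCE B (Python) =====
-- def __parse(defaults, uopts=None):
--     if uopts is None:
--         return defaults.copy()
--     return {k: uopts[k] if uopts.get(k) is not None else v
--             for k, v in defaults.items()}
-- ===== Notes on version B (the rewrite author's own statement) =====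
-- stated objective: faster
-- what changed: Instead of copying defaults and mutating it via a nested defaults*uopts key scan, B builds the result dict directly with a single comprehension over defaults.items() using an O(1) uopts lookup per key (no mutation).
import Mathlib
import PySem

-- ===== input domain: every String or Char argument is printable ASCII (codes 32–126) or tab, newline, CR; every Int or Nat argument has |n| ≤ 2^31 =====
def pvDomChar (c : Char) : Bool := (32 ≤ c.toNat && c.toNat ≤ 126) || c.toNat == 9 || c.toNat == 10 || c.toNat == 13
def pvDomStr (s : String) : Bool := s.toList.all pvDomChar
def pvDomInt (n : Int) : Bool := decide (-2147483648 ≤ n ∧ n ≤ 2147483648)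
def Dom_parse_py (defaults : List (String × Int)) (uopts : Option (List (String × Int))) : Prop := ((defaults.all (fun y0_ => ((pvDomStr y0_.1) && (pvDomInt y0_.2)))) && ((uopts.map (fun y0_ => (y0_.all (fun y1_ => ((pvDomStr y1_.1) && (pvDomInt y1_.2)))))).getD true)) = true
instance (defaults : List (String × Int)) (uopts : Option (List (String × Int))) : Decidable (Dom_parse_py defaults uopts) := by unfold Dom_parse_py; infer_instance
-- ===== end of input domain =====

-- B replaces A's nested in-place update loops by building the result dict directly
-- with one comprehension over defaults and a lookup into uopts (faster; same return value).

-- ===== PORT A =====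
-- A: rd = defaults.copy(); for k in defaults.keys(): for r in uopts.keys():
--      if k == r and uopts[r] is not None: rd[k] = uopts[r]
-- Values are Int here, so 'uopts[r] is not None' is always true and is dropped;
-- 'uopts[r]' is get? (some, since r ranges over uopts' keys; the none branch is unreachable).
def parse_py (defaults : List (String × Int)) (uopts : Option (List (String × Int))) : List (String × Int) :=
  let return_dict := PySem.Dict.mk defaults
  match uopts with
  | none => return_dict.items
  | some u =>
    let ud := PySem.Dict.mk u
    (((PySem.Dict.mk defaults).keys).foldl (fun rd k =>
        (ud.keys).foldl (fun rd r =>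
          if k == r then
            match ud.get? r with
            | some v => rd.insert k v
            | none => rd
          else rd) rd) return_dict).items

-- ===== PORT B =====
-- B: if uopts is None: return defaults.copy()
--    return {k: uopts[k] if uopts.get(k) is not None else v for k, v in defaults.items()}
-- Values are Int, so 'uopts.get(k) is not None' is exactly 'get? returns some'.
def parse_py_alt (defaults : List (String × Int)) (uopts : Option (List (String × Int))) : List (String × Int) :=
  match uopts with
  | none => (PySem.Dict.mk defaults).items
  | some u =>
    ((PySem.Dict.mk defaults).items).map (fun p =>
      match (PySem.Dict.mk u).get? p.1 with
      | some v => (p.1, v)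
      | none => p)

-- ===== PRECONDITION & SPEC =====
-- Pre_ excludes association lists whose defaults keys repeat: those do not represent any
-- Python dict (A's 'defaults' is a dict, whose keys are unique), so nothing is claimed there.
def Pre_parse_py (defaults : List (String × Int)) (uopts : Option (List (String × Int))) : Prop :=
  (defaults.map Prod.fst).Nodup
instance (defaults : List (String × Int)) (uopts : Option (List (String × Int))) : Decidable (Pre_parse_py defaults uopts) := by unfold Pre_parse_py; infer_instance

def pvWitness_parse_py : (List (String × Int)) × (Option (List (String × Int))) :=
  ([("a", 1), ("b", 2)], some [("b", 7), ("c", 9)])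

def Spec_parse_py (defaults : List (String × Int)) (uopts : Option (List (String × Int))) (out : List (String × Int)) : Prop := out = parse_py_alt defaults uopts
instance (defaults : List (String × Int)) (uopts : Option (List (String × Int))) (out : List (String × Int)) : Decidable (Spec_parse_py defaults uopts out) := by unfold Spec_parse_py; infer_instance

-- ===== CLAIM (what is proved, stated in full; the proofs are below) =====
def Claim_equal_parse_py : Prop := ∀ (defaults : List (String × Int)) (uopts : Option (List (String × Int))), Dom_parse_py defaults uopts → Pre_parse_py defaults uopts → Spec_parse_py defaults uopts (parse_py defaults uopts)

-- ===== LEMMAS AND PROOFS =====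

def pvOverride (U : PySem.Dict String Int) (q : String × Int) : String × Int :=
  match U.get? q.1 with
  | some v => (q.1, v)
  | none => q

lemma pv_nodup_parts (done l : List (String × Int)) (q : String × Int)
    (h : ((done ++ q :: l).map Prod.fst).Nodup) :
    (∀ p ∈ done, p.1 ≠ q.1) ∧ (∀ p ∈ l, p.1 ≠ q.1) := by
  rw [List.map_append, List.map_cons, List.nodup_append] at h
  obtain ⟨h1, h2, h3⟩ := h
  refine ⟨fun p hp he => ?_, fun p hp he => ?_⟩
  · exact h3 _ (List.mem_map_of_mem hp) q.1 (by simp) he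
  · exact (List.nodup_cons.mp h2).1 (by rw [← he]; exact List.mem_map_of_mem hp)

lemma pv_foldA_items (ud : PySem.Dict String Int) :
    ∀ (l done : List (String × Int)),
      ((done ++ l).map Prod.fst).Nodup →
      ((l.map Prod.fst).foldl (fun rd k =>
          match ud.get? k with
          | some v => rd.insert k v
          | none => rd) (PySem.Dict.mk (done ++ l))).items
        = done ++ l.map (pvOverride ud) := by
  intro l
  induction l with
  | nil => intro done _; simp
  | cons q l ih =>
    intro done h
    obtain ⟨hd, hl⟩ := pv_nodup_parts done l q h
    rw [List.map_cons, List.foldl_cons]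
    rcases hs : ud.get? q.1 with _ | v
    · have hmk : PySem.Dict.mk (done ++ q :: l) = PySem.Dict.mk ((done ++ [q]) ++ l) := by
        simp
      rw [hmk, ih (done ++ [q]) (by simpa using h)]
      simp [pvOverride, hs]
    · have hc : (PySem.Dict.mk (done ++ q :: l)).contains q.1 = true := by
        rw [PySem.Dict.contains_iff_mem_keys]
        simp
      have e1 : done.map (fun p => if (p.1 == q.1) = true then (q.1, v) else p) = done := by
        rw [List.map_congr_left (g := id) (fun p hp => by simp [hd p hp]), List.map_id]
      have e2 : l.map (fun p => if (p.1 == q.1) = true then (q.1, v) else p) = l := by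
        rw [List.map_congr_left (g := id) (fun p hp => by simp [hl p hp]), List.map_id]
      have hd2 : (PySem.Dict.mk (done ++ q :: l)).insert q.1 v
          = PySem.Dict.mk ((done ++ [(q.1, v)]) ++ l) := by
        apply PySem.Dict.ext
        rw [PySem.Dict.items_insert_of_contains _ v hc]
        show (done ++ q :: l).map _ = _
        rw [List.map_append, List.map_cons, e1, e2]
        simp
      dsimp only
      rw [hd2, ih ((done ++ [(q.1, v)])) (by simpa using h)]
      simp [pvOverride, hs]

lemma pv_inner_eq (ud : PySem.Dict String Int) (k : String) :
    ∀ (ks : List String) (rd : PySem.Dict String Int),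
      (k ∈ ks → (ud.get? k).isSome) →
      ks.foldl (fun rd r =>
          if k == r then
            match ud.get? r with
            | some v => rd.insert k v
            | none => rd
          else rd) rd
        = if k ∈ ks then rd.insert k ((ud.get? k).getD 0) else rd := by
  intro ks
  induction ks with
  | nil => intro rd _; simp
  | cons r ks ih =>
    intro rd h
    by_cases hk : k = r
    · subst hk
      rcases hs : ud.get? k with _ | v
      · simp [hs] at h
      · rw [List.foldl_cons]
        simp only [beq_self_eq_true, if_pos, hs]
        rw [ih _ (fun _ => by simp [hs])]
        by_cases hm : k ∈ ks <;>
          simp [hm, hs, PySem.Dict.insert_insert_self]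
    · rw [List.foldl_cons]
      have hb : (k == r) = false := by simp [hk]
      simp only [hb, Bool.false_eq_true, if_false]
      rw [ih _ (fun hm => h (by simp [hm]))]
      simp [List.mem_cons, hk]

-- A's outer step (inner loop collapsed) is the match-on-lookup step.
lemma pv_stepA_eq (u : List (String × Int)) :
    (fun (rd : PySem.Dict String Int) (k : String) =>
        ((PySem.Dict.mk u).keys).foldl (fun rd r =>
          if k == r then
            match (PySem.Dict.mk u).get? r with
            | some v => rd.insert k v
            | none => rd
          else rd) rd)
      = (fun rd k =>
          match (PySem.Dict.mk u).get? k with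
          | some v => rd.insert k v
          | none => rd) := by
  funext rd k
  rw [pv_inner_eq (PySem.Dict.mk u) k ((PySem.Dict.mk u).keys) rd (fun hm => by
    rw [Option.isSome_iff_ne_none]
    intro hn
    exact (PySem.Dict.get?_eq_none_iff_not_mem_keys _ _ |>.mp hn) hm)]
  rcases hs : (PySem.Dict.mk u).get? k with _ | v
  · rw [if_neg ((PySem.Dict.get?_eq_none_iff_not_mem_keys _ _).mp hs)]
  · rw [if_pos (by
      by_contra hm
      rw [(PySem.Dict.get?_eq_none_iff_not_mem_keys _ _).mpr hm] at hs
      simp at hs)]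
    rfl

-- ===== VERDICT (by name: the statement is the Claim_ definition above) =====
theorem parse_py_spec : Claim_equal_parse_py := by
  intro defaults uopts _hdom hnd
  show parse_py defaults uopts = parse_py_alt defaults uopts
  cases uopts with
  | none => rfl
  | some u =>
    show (((PySem.Dict.mk defaults).keys).foldl _ (PySem.Dict.mk defaults)).items
        = ((PySem.Dict.mk defaults).items).map _
    rw [pv_stepA_eq u]
    have hA : (((PySem.Dict.mk defaults).keys).foldl (fun rd k =>
          match (PySem.Dict.mk u).get? k with
          | some v => rd.insert k v
          | none => rd) (PySem.Dict.mk defaults)).items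
        = defaults.map (pvOverride (PySem.Dict.mk u)) := by
      have := pv_foldA_items (PySem.Dict.mk u) defaults [] (by simpa using hnd)
      simpa using this
    rw [hA]
    rfl
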